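-- pv_equiv track=rewrite | github.com/lack-of-purpose/HMM_tagger | HMMmodel.py | t_unigram_count
-- ===== SOURCE A (Python) =====
-- def t_unigram_count(train_tags, unigram_amount):
--     unigram_cnt = {}
--     for i in range(unigram_amount):
--         if train_tags[i] in unigram_cnt:
--             unigram_cnt[train_tags[i]] = unigram_cnt[train_tags[i]]+1
--         else:
--             unigram_cnt[train_tags[i]] = 1
--
--     return unigram_cnt
-- ===== SOURCE B (Python) =====
-- def t_unigram_count(train_tags, unigram_amount):
--     prefix = [train_tags[i] for i in range(unigram_amount)]
--     return {tag: prefix.count(tag) for tag in dict.fromkeys(prefix)}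
-- ===== Notes on version B (the rewrite author's own statement) =====
-- stated objective: alternative
-- what changed: Replaces A's incremental per-element dict counting with a two-phase pass: materialise the prefix, deduplicate its tags in first-occurrence order, and map each distinct tag to its total count in the prefix.
-- outside the precondition, e.g. on t_unigram_count(['a'], 2): A raises IndexError, B raises IndexError
import Mathlib
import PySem

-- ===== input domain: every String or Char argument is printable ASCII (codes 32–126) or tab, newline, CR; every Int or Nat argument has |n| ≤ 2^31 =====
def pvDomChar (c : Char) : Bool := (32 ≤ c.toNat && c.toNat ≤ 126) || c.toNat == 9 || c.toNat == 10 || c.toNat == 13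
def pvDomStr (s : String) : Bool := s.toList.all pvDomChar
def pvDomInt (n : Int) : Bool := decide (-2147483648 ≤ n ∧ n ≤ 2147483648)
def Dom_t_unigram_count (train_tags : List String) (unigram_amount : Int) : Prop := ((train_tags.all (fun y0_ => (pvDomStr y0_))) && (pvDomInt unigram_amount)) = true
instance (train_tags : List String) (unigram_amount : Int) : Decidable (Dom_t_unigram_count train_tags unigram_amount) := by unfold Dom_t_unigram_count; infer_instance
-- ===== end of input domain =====

-- B counts the first `unigram_amount` tags by deduplicating the pref and counting each distinct
-- tag's occurrences, instead of A's incremental per-element dict update (alternative decomposition).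


-- ===== PORT A =====
def t_unigram_count (train_tags : List String) (unigram_amount : Int) : List (String × Int) :=
  ((PySem.List.pyRange 0 unigram_amount 1).foldl
    (fun d i =>
      let t := PySem.List.pyGetD train_tags i ""
      if d.contains t then d.insert t (d.getD t 0 + 1) else d.insert t 1)
    PySem.Dict.empty).items

-- ===== PORT B =====
def t_unigram_count_alt (train_tags : List String) (unigram_amount : Int) : List (String × Int) :=
  let pref := (PySem.List.pyRange 0 unigram_amount 1).map (fun i => PySem.List.pyGetD train_tags i "")
  (PySem.Dict.ofList
    ((PySem.List.dedup pref).map (fun tag => (tag, (PySem.List.count pref tag : Int))))).items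

-- ===== PRECONDITION & SPEC =====
-- Pre_ excludes exactly the inputs where A raises IndexError: unigram_amount exceeding the list length.
def Pre_t_unigram_count (train_tags : List String) (unigram_amount : Int) : Prop :=
  unigram_amount ≤ (train_tags.length : Int)
instance (train_tags : List String) (unigram_amount : Int) : Decidable (Pre_t_unigram_count train_tags unigram_amount) := by unfold Pre_t_unigram_count; infer_instance
def pvWitness_t_unigram_count : List String × Int := (["NN", "VB", "NN"], 3)

def Spec_t_unigram_count (train_tags : List String) (unigram_amount : Int) (out : List (String × Int)) : Prop := out = t_unigram_count_alt train_tags unigram_amount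
instance (train_tags : List String) (unigram_amount : Int) (out : List (String × Int)) : Decidable (Spec_t_unigram_count train_tags unigram_amount out) := by unfold Spec_t_unigram_count; infer_instance

-- ===== CLAIM (what is proved, stated in full; the proofs are below) =====
def Claim_equal_t_unigram_count : Prop := ∀ (train_tags : List String) (unigram_amount : Int), Dom_t_unigram_count train_tags unigram_amount → Pre_t_unigram_count train_tags unigram_amount → Spec_t_unigram_count train_tags unigram_amount (t_unigram_count train_tags unigram_amount)

-- ===== LEMMAS AND PROOFS =====

-- A's loop, rephrased over the pref list, is exactly the Counter fold.
theorem t_unigram_count_eq_counter_items (train_tags : List String) (unigram_amount : Int) :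
    t_unigram_count train_tags unigram_amount =
      (PySem.Dict.counter ((PySem.List.pyRange 0 unigram_amount 1).map
        (fun i => PySem.List.pyGetD train_tags i ""))).items := by
  unfold t_unigram_count
  rw [PySem.List.foldl_congr_mem _ _
        (fun d i => d.insert (PySem.List.pyGetD train_tags i "")
          (d.getD (PySem.List.pyGetD train_tags i "") 0 + 1)) _ ?_]
  · rw [← List.foldl_map (f := fun i => PySem.List.pyGetD train_tags i "")
        (g := fun (d : PySem.Dict String Int) t => d.insert t (d.getD t 0 + 1))]
    rw [PySem.Dict.foldl_insert_getD_add_one_eq_counter]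
  · intro acc x _
    by_cases h : acc.contains (PySem.List.pyGetD train_tags x "") = true
    · simp [h]
    · simp only [Bool.not_eq_true] at h
      simp [h, PySem.Dict.getD_of_not_contains acc 0 h]

-- B's dict comprehension over distinct keys lists exactly its key/value pairs.
theorem alt_items (train_tags : List String) (unigram_amount : Int) :
    t_unigram_count_alt train_tags unigram_amount =
      ((PySem.List.dedup ((PySem.List.pyRange 0 unigram_amount 1).map
          (fun i => PySem.List.pyGetD train_tags i ""))).map
        (fun tag => (tag, (PySem.List.count ((PySem.List.pyRange 0 unigram_amount 1).map
          (fun i => PySem.List.pyGetD train_tags i "")) tag : Int)))) := by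
  unfold t_unigram_count_alt
  set pref := (PySem.List.pyRange 0 unigram_amount 1).map (fun i => PySem.List.pyGetD train_tags i "") with hpre
  show (PySem.Dict.ofList _).items = _
  unfold PySem.Dict.ofList PySem.Dict.update
  rw [List.foldl_map]
  rw [PySem.Dict.items_foldl_insert_fresh (PySem.List.dedup pref) (fun tag => tag)
        (fun tag => (PySem.List.count pref tag : Int)) PySem.Dict.empty
        (fun a _ => PySem.Dict.contains_empty a)
        (by simp)]
  simp [show (PySem.Dict.empty : PySem.Dict String Int).items = [] from rfl]

-- ===== VERDICT (by name: the statement is the Claim_ definition above) =====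
theorem t_unigram_count_spec : Claim_equal_t_unigram_count := by
  intro train_tags unigram_amount _ _
  unfold Spec_t_unigram_count
  rw [t_unigram_count_eq_counter_items, alt_items, PySem.Dict.items_counter]
  simp [PySem.List.count]
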